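-- pv_equiv track=rewrite | github.com/Shankyyadav3/Non-Invasive-Glucometer | commons.py | get_balanced_dataset
-- ===== SOURCE A (Python) =====
-- def get_balanced_dataset(X, Y):
--     new_X = []
--     new_Y = []
--     zero_count = Y.count(0)
--     one_count = Y.count(1)
--     flag = 0
--     if one_count > zero_count:
--         flag = 1
--     # if flag = 1 means we need to take zero_count number of features for both X and Y
--     count_0 = 0
--     count_1 = 0
--     index = 0
--     if flag == 1:
--         counter = zero_count
--     else:
--         counter = one_count
--     while count_0 < counter or count_1 < counter:
--         if Y[index] == 0:
--             count_0 = count_0 + 1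
--         else:
--             count_1 = count_1 + 1
--         new_X.append(X[index])
--         new_Y.append(Y[index])
--         index = index + 1
--     return new_X, new_Y
-- ===== SOURCE B (Python) =====
-- def get_balanced_dataset(X, Y):
--     counter = min(Y.count(0), Y.count(1))
--     if counter == 0:
--         return [], []
--     z = n = 0
--     iz = inz = -1
--     for i, y in enumerate(Y):
--         if y == 0:
--             z += 1
--             if z == counter:
--                 iz = i
--         else:
--             n += 1
--             if n == counter:
--                 inz = i
--     L = max(iz, inz) + 1
--     return X[:L], Y[:L]
-- ===== Notes on version B (the rewrite author's own statement) =====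
-- stated objective: alternative
-- what changed: Replaces A's append-one-element-at-a-time while-loop (building new lists and mutable counters until both class counts reach min(#0,#1)) by a locate-cutoff-then-slice decomposition: one scan records the index of the counter-th zero and of the counter-th non-zero, and the result is X[:L], Y[:L] with L = max of those indices + 1.
import Mathlib
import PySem

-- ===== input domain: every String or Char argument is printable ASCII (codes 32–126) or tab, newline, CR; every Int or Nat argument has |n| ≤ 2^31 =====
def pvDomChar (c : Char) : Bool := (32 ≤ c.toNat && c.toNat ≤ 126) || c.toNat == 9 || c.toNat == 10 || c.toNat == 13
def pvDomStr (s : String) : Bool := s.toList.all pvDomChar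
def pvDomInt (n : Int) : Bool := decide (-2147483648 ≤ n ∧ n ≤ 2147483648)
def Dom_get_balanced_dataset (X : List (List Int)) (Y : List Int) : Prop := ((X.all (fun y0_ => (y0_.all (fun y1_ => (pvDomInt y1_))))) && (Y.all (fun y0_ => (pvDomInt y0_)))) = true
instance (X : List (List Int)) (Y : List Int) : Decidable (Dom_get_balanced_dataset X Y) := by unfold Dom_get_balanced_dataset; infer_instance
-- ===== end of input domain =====

-- B replaces A's append-until-both-classes-reach-min-count while-loop by a locate-cutoff-then-slice
-- decomposition (one scan records where each class reaches the min count, then slices); same return value.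

-- ===== PORT A =====
-- the while loop of A: state (new_X, new_Y, count_0, count_1, index); fuel Y.length+1 is enough for
-- every iteration the Python loop performs before returning or raising (index grows by 1 per step and
-- Python raises IndexError once index passes len(Y) or len(X) — those inputs are outside Pre_).
def pvALoop (X : List (List Int)) (Y : List Int) (counter : Int) :
    Nat → List (List Int) → List Int → Int → Int → Int → List (List Int) × List Int
  | 0, nX, nY, _, _, _ => (nX, nY)
  | fuel + 1, nX, nY, c0, c1, idx =>
    if c0 < counter ∨ c1 < counter then
      match PySem.List.pyGet? Y idx, PySem.List.pyGet? X idx with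
      | some y, some x =>
        if y = 0 then pvALoop X Y counter fuel (nX ++ [x]) (nY ++ [y]) (c0 + 1) c1 (idx + 1)
        else pvALoop X Y counter fuel (nX ++ [x]) (nY ++ [y]) c0 (c1 + 1) (idx + 1)
      | _, _ => (nX, nY)   -- IndexError in Python: excluded by Pre_
    else (nX, nY)

def get_balanced_dataset (X : List (List Int)) (Y : List Int) : List (List Int) × List Int :=
  let zero_count : Int := (PySem.List.count Y 0 : Int)
  let one_count : Int := (PySem.List.count Y 1 : Int)
  let flag : Int := if one_count > zero_count then 1 else 0
  let counter : Int := if flag = 1 then zero_count else one_count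
  pvALoop X Y counter (Y.length + 1) [] [] 0 0 0

-- ===== PORT B =====
-- the for loop of B: state (z, n, iz, inz) scanned over Y with running index i
def pvBScan (counter : Int) : List Int → Int → Int → Int → Int → Int → Int × Int
  | [], _, _, _, iz, inz => (iz, inz)
  | y :: t, i, z, n, iz, inz =>
    if y = 0 then
      pvBScan counter t (i + 1) (z + 1) n (if z + 1 = counter then i else iz) inz
    else
      pvBScan counter t (i + 1) z (n + 1) iz (if n + 1 = counter then i else inz)

def get_balanced_dataset_alt (X : List (List Int)) (Y : List Int) : List (List Int) × List Int :=
  let counter : Int := min (PySem.List.count Y 0 : Int) (PySem.List.count Y 1 : Int)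
  if counter = 0 then ([], [])
  else
    let p := pvBScan counter Y 0 0 0 (-1) (-1)
    let L : Int := max p.1 p.2 + 1
    (PySem.List.slice X none (some L), PySem.List.slice Y none (some L))

-- ===== PRECONDITION & SPEC =====
-- Pre_ is exactly the set of inputs on which A returns: some prefix of length ≤ len(X) already
-- contains min(Y.count(0), Y.count(1)) zeros and that many non-zeros; otherwise A's loop indexes
-- past the end of X (or of Y) and raises IndexError.
def Pre_get_balanced_dataset (X : List (List Int)) (Y : List Int) : Prop :=
  ∃ n ∈ List.range (X.length + 1),
    min (Y.count 0) (Y.count 1) ≤ (Y.take n).count 0 ∧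
    min (Y.count 0) (Y.count 1) ≤ (Y.take n).countP (fun y => !(y == 0))
instance (X : List (List Int)) (Y : List Int) : Decidable (Pre_get_balanced_dataset X Y) := by
  unfold Pre_get_balanced_dataset; infer_instance
def pvWitness_get_balanced_dataset : List (List Int) × List Int := ([[1], [2]], [0, 1])

def Spec_get_balanced_dataset (X : List (List Int)) (Y : List Int) (out : List (List Int) × List Int) : Prop := out = get_balanced_dataset_alt X Y
instance (X : List (List Int)) (Y : List Int) (out : List (List Int) × List Int) : Decidable (Spec_get_balanced_dataset X Y out) := by unfold Spec_get_balanced_dataset; infer_instance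

-- ===== CLAIM (what is proved, stated in full; the proofs are below) =====
def Claim_equal_get_balanced_dataset : Prop := ∀ (X : List (List Int)) (Y : List Int), Dom_get_balanced_dataset X Y → Pre_get_balanced_dataset X Y → Spec_get_balanced_dataset X Y (get_balanced_dataset X Y)

-- ===== LEMMAS AND PROOFS =====

-- the number of loop iterations A performs: scan until both budgets r0 (zeros) and r1 (non-zeros) are spent
def pvCut : List Int → Int → Int → Nat
  | [], _, _ => 0
  | y :: t, r0, r1 =>
    if r0 ≤ 0 ∧ r1 ≤ 0 then 0
    else 1 + (if y = 0 then pvCut t (r0 - 1) r1 else pvCut t r0 (r1 - 1))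

lemma pvCut_nonpos (t : List Int) (r0 r1 : Int) (h0 : r0 ≤ 0) (h1 : r1 ≤ 0) :
    pvCut t r0 r1 = 0 := by
  cases t <;> simp [pvCut, h0, h1]

lemma pvCut_le (Y2 : List Int) : ∀ (n : Nat) (r0 r1 : Int),
    r0 ≤ ((Y2.take n).count 0 : Int) →
    r1 ≤ ((Y2.take n).countP (fun y => !(y == 0)) : Int) →
    pvCut Y2 r0 r1 ≤ n := by
  induction Y2 with
  | nil => intro n r0 r1 _ _; simp [pvCut]
  | cons y t ih =>
    intro n r0 r1 h0 h1
    by_cases hz : r0 ≤ 0 ∧ r1 ≤ 0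
    · simp [pvCut, hz]
    · match n with
      | 0 => simp at h0 h1; omega
      | m + 1 =>
        rw [List.take_succ_cons] at h0 h1
        by_cases hy : y = 0
        · subst hy
          simp [List.count_cons, List.countP_cons] at h0 h1
          have := ih m (r0 - 1) r1 (by push_cast; omega) (by push_cast at h1 ⊢; omega)
          simp [pvCut, hz, if_pos rfl]
          omega
        · simp [List.count_cons, List.countP_cons, hy] at h0 h1
          have := ih m r0 (r1 - 1) (by push_cast at h0 ⊢; omega) (by push_cast at h1 ⊢; omega)
          simp [pvCut, hz, hy]
          omega

lemma pvALoop_eq (counter : Int) :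
    ∀ (Y2 : List Int) (X2 : List (List Int)) (preX : List (List Int)) (preY : List Int)
      (c0 c1 : Int) (fuel : Nat),
      preX.length = preY.length →
      Y2.length ≤ fuel →
      pvCut Y2 (counter - c0) (counter - c1) ≤ X2.length →
      pvALoop (preX ++ X2) (preY ++ Y2) counter fuel preX preY c0 c1 (preX.length : Int) =
        (preX ++ X2.take (pvCut Y2 (counter - c0) (counter - c1)),
         preY ++ Y2.take (pvCut Y2 (counter - c0) (counter - c1))) := by
  intro Y2
  induction Y2 with
  | nil =>
    intro X2 preX preY c0 c1 fuel hlen _ _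
    have hnone : PySem.List.pyGet? preY (preX.length : Int) = none := by
      rw [hlen, PySem.List.pyGet?_natCast]
      simp
    cases fuel with
    | zero => simp [pvALoop, pvCut]
    | succ f =>
      simp only [pvALoop, pvCut, List.take_zero, List.append_nil, hnone]
      split <;> rfl
  | cons y t ih =>
    intro X2 preX preY c0 c1 fuel hlen hfuel hcut
    by_cases hg : c0 < counter ∨ c1 < counter
    · have hcc : ¬((counter - c0) ≤ 0 ∧ (counter - c1) ≤ 0) := by omega
      cases fuel with
      | zero => simp at hfuel
      | succ f =>
        have hfuel' : t.length ≤ f := by simpa using hfuel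
        cases X2 with
        | nil =>
          simp only [pvCut, hcc, if_false] at hcut
          simp at hcut
        | cons x X2' =>
          have hY : PySem.List.pyGet? (preY ++ y :: t) (preX.length : Int) = some y := by
            rw [hlen, PySem.List.pyGet?_natCast, List.getElem?_append_right (le_refl _)]
            simp
          have hX : PySem.List.pyGet? (preX ++ x :: X2') (preX.length : Int) = some x := by
            rw [PySem.List.pyGet?_natCast, List.getElem?_append_right (le_refl _)]
            simp
          have e1 : preX ++ x :: X2' = (preX ++ [x]) ++ X2' := by simp
          have e2 : preY ++ y :: t = (preY ++ [y]) ++ t := by simp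
          have eidx : ((preX.length : Int) + 1) = (((preX ++ [x]).length : Nat) : Int) := by
            simp
          have hstep : pvCut (y :: t) (counter - c0) (counter - c1)
              = if (counter - c0) ≤ 0 ∧ (counter - c1) ≤ 0 then 0
                else 1 + (if y = 0 then pvCut t (counter - c0 - 1) (counter - c1)
                          else pvCut t (counter - c0) (counter - c1 - 1)) := rfl
          by_cases hy : y = 0
          · subst hy
            have hc2 : pvCut (0 :: t) (counter - c0) (counter - c1)
                = pvCut t (counter - (c0 + 1)) (counter - c1) + 1 := by
              rw [hstep, if_neg hcc, if_pos rfl,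
                (by ring : counter - c0 - 1 = counter - (c0 + 1))]
              omega
            have hcut' : pvCut t (counter - (c0 + 1)) (counter - c1) ≤ X2'.length := by
              rw [hc2] at hcut; simpa using hcut
            have hlen' : (preX ++ [x]).length = (preY ++ [(0 : Int)]).length := by
              simp [hlen]
            have hrec := ih X2' (preX ++ [x]) (preY ++ [(0 : Int)]) (c0 + 1) c1 f hlen' hfuel' hcut'
            simp only [pvALoop, hg, if_true, hY, hX, if_pos rfl]
            rw [eidx, e1, e2, hrec, hc2]
            simp [List.take_succ_cons, List.append_assoc]
          · have hc2 : pvCut (y :: t) (counter - c0) (counter - c1)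
                = pvCut t (counter - c0) (counter - (c1 + 1)) + 1 := by
              rw [hstep, if_neg hcc, if_neg hy,
                (by ring : counter - c1 - 1 = counter - (c1 + 1))]
              omega
            have hcut' : pvCut t (counter - c0) (counter - (c1 + 1)) ≤ X2'.length := by
              rw [hc2] at hcut; simpa using hcut
            have hlen' : (preX ++ [x]).length = (preY ++ [y]).length := by
              simp [hlen]
            have hrec := ih X2' (preX ++ [x]) (preY ++ [y]) c0 (c1 + 1) f hlen' hfuel' hcut'
            simp only [pvALoop, hg, if_true, hY, hX]
            rw [if_neg hy, eidx, e1, e2, hrec, hc2]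
            simp [List.take_succ_cons, List.append_assoc]
    · have h0 : counter - c0 ≤ 0 := by omega
      have h1 : counter - c1 ≤ 0 := by omega
      rw [pvCut_nonpos _ _ _ h0 h1]
      cases fuel with
      | zero => simp at hfuel
      | succ f => simp [pvALoop, hg]

lemma pvBScan_eq (counter : Int) :
    ∀ (Y2 : List Int) (i z n iz inz : Int),
      iz < i → inz < i →
      (z < counter → counter - z ≤ ((Y2.count 0 : Nat) : Int)) →
      (n < counter → counter - n ≤ ((Y2.countP (fun y => !(y == 0)) : Nat) : Int)) →
      max (pvBScan counter Y2 i z n iz inz).1 (pvBScan counter Y2 i z n iz inz).2 + 1 =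
        if z < counter ∨ n < counter then i + (pvCut Y2 (counter - z) (counter - n) : Int)
        else max iz inz + 1 := by
  intro Y2
  induction Y2 with
  | nil =>
    intro i z n iz inz _ _ h0 h1
    simp only [List.count_nil, List.countP_nil, Nat.cast_zero] at h0 h1
    have : ¬(z < counter ∨ n < counter) := by omega
    simp [pvBScan, this]
  | cons y t ih =>
    intro i z n iz inz hiz hinz h0 h1
    by_cases hy : y = 0
    · subst hy
      have h0' : z + 1 < counter → counter - (z + 1) ≤ ((t.count 0 : Nat) : Int) := by
        intro h
        have := h0 (by omega)
        simp [List.count_cons] at this ⊢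
        push_cast at this ⊢
        omega
      have h1' : n < counter → counter - n ≤ ((t.countP (fun y => !(y == 0)) : Nat) : Int) := by
        intro h
        have := h1 h
        simpa [List.countP_cons] using this
      have hrec := ih (i + 1) (z + 1) n (if z + 1 = counter then i else iz) inz
        (by split <;> omega) (by omega) h0' h1'
      simp only [pvBScan]
      simp only [eq_self_iff_true, if_true]
      rw [hrec]
      by_cases hg : z < counter ∨ n < counter
      · have hcc : ¬((counter - z) ≤ 0 ∧ (counter - n) ≤ 0) := by omega
        have hc2 : pvCut (0 :: t) (counter - z) (counter - n)
            = 1 + pvCut t (counter - (z + 1)) (counter - n) := by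
          have hstep : pvCut (0 :: t) (counter - z) (counter - n)
              = if (counter - z) ≤ 0 ∧ (counter - n) ≤ 0 then 0
                else 1 + (if (0 : Int) = 0 then pvCut t (counter - z - 1) (counter - n)
                          else pvCut t (counter - z) (counter - n - 1)) := rfl
          rw [hstep, if_neg hcc, if_pos (rfl : (0 : Int) = 0),
            (by ring : counter - z - 1 = counter - (z + 1))]
        by_cases hg' : z + 1 < counter ∨ n < counter
        · rw [if_pos hg', if_pos hg, hc2]
          push_cast
          ring
        · -- z + 1 = counter (forced) and n ≥ counter
          have hzc : z + 1 = counter := by omega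
          have hcut0 : pvCut t (counter - (z + 1)) (counter - n) = 0 :=
            pvCut_nonpos _ _ _ (by omega) (by omega)
          rw [if_neg hg', if_pos hg, hc2, hcut0, if_pos hzc]
          omega
      · have hg' : ¬(z + 1 < counter ∨ n < counter) := by omega
        have hne : ¬(z + 1 = counter) := by omega
        rw [if_neg hg', if_neg hg, if_neg hne]
    · have h1' : n + 1 < counter → counter - (n + 1) ≤ ((t.countP (fun y => !(y == 0)) : Nat) : Int) := by
        intro h
        have := h1 (by omega)
        simp [List.countP_cons, hy] at this ⊢
        push_cast at this ⊢
        omega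
      have h0' : z < counter → counter - z ≤ ((t.count 0 : Nat) : Int) := by
        intro h
        have := h0 h
        simpa [List.count_cons, hy] using this
      have hrec := ih (i + 1) z (n + 1) iz (if n + 1 = counter then i else inz)
        (by omega) (by split <;> omega) h0' h1'
      simp only [pvBScan, if_neg hy]
      rw [hrec]
      by_cases hg : z < counter ∨ n < counter
      · have hcc : ¬((counter - z) ≤ 0 ∧ (counter - n) ≤ 0) := by omega
        have hc2 : pvCut (y :: t) (counter - z) (counter - n)
            = 1 + pvCut t (counter - z) (counter - (n + 1)) := by
          have hstep : pvCut (y :: t) (counter - z) (counter - n)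
              = if (counter - z) ≤ 0 ∧ (counter - n) ≤ 0 then 0
                else 1 + (if y = 0 then pvCut t (counter - z - 1) (counter - n)
                          else pvCut t (counter - z) (counter - n - 1)) := rfl
          rw [hstep, if_neg hcc, if_neg hy,
            (by ring : counter - n - 1 = counter - (n + 1))]
        by_cases hg' : z < counter ∨ n + 1 < counter
        · rw [if_pos hg', if_pos hg, hc2]
          push_cast
          ring
        · have hnc : n + 1 = counter := by omega
          have hcut0 : pvCut t (counter - z) (counter - (n + 1)) = 0 :=
            pvCut_nonpos _ _ _ (by omega) (by omega)
          rw [if_neg hg', if_pos hg, hc2, hcut0, if_pos hnc]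
          omega
      · have hg' : ¬(z < counter ∨ n + 1 < counter) := by omega
        have hne : ¬(n + 1 = counter) := by omega
        rw [if_neg hg', if_neg hg, if_neg hne]

-- closed forms: both programs return (X.take K, Y.take K) with K = pvCut Y m m, m = min(#0, #1)
lemma A_closed (X : List (List Int)) (Y : List Int)
    (hpre : Pre_get_balanced_dataset X Y) :
    get_balanced_dataset X Y =
      (X.take (pvCut Y (min ((Y.count 0 : Nat) : Int) ((Y.count 1 : Nat) : Int))
                       (min ((Y.count 0 : Nat) : Int) ((Y.count 1 : Nat) : Int))),
       Y.take (pvCut Y (min ((Y.count 0 : Nat) : Int) ((Y.count 1 : Nat) : Int))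
                       (min ((Y.count 0 : Nat) : Int) ((Y.count 1 : Nat) : Int)))) := by
  obtain ⟨nn, hn, hc0, hc1⟩ := hpre
  have hnle : nn ≤ X.length := by simpa [Nat.lt_succ_iff] using List.mem_range.mp hn
  have hcut : pvCut Y (min ((Y.count 0 : Nat) : Int) ((Y.count 1 : Nat) : Int))
      (min ((Y.count 0 : Nat) : Int) ((Y.count 1 : Nat) : Int)) ≤ X.length := by
    refine le_trans (pvCut_le Y nn _ _ ?_ ?_) hnle
    · push_cast; omega
    · push_cast; omega
  have key := pvALoop_eq (min ((Y.count 0 : Nat) : Int) ((Y.count 1 : Nat) : Int)) Y X [] [] 0 0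
    (Y.length + 1) rfl (by omega) (by simpa using hcut)
  simp only [List.nil_append, List.length_nil, Nat.cast_zero, sub_zero] at key
  simp only [get_balanced_dataset, PySem.List.count_eq]
  split_ifs <;>
    first
      | (have hmin : min ((Y.count 0 : Nat) : Int) ((Y.count 1 : Nat) : Int)
            = ((Y.count 0 : Nat) : Int) := by omega
         simpa [hmin] using key)
      | (have hmin : min ((Y.count 0 : Nat) : Int) ((Y.count 1 : Nat) : Int)
            = ((Y.count 1 : Nat) : Int) := by omega
         simpa [hmin] using key)

lemma B_closed (X : List (List Int)) (Y : List Int) :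
    get_balanced_dataset_alt X Y =
      (X.take (pvCut Y (min ((Y.count 0 : Nat) : Int) ((Y.count 1 : Nat) : Int))
                       (min ((Y.count 0 : Nat) : Int) ((Y.count 1 : Nat) : Int))),
       Y.take (pvCut Y (min ((Y.count 0 : Nat) : Int) ((Y.count 1 : Nat) : Int))
                       (min ((Y.count 0 : Nat) : Int) ((Y.count 1 : Nat) : Int)))) := by
  set m : Int := min ((Y.count 0 : Nat) : Int) ((Y.count 1 : Nat) : Int) with hm
  unfold get_balanced_dataset_alt
  simp only [PySem.List.count_eq, ← hm]
  by_cases h0 : m = 0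
  · rw [if_pos h0, h0, pvCut_nonpos Y 0 0 le_rfl le_rfl]
    simp
  · rw [if_neg h0]
    have hmpos : 0 < m := by
      have : (0 : Int) ≤ m := le_min (by positivity) (by positivity)
      omega
    have hle1 : ((Y.count 1 : Nat) : Int) ≤ ((Y.countP (fun y => !(y == 0)) : Nat) : Int) := by
      have : Y.count 1 ≤ Y.countP (fun y => !(y == 0)) := by
        unfold List.count
        refine List.countP_mono_left ?_
        intro a _ ha
        simp at ha ⊢
        omega
      exact_mod_cast this
    have hscan := pvBScan_eq m Y 0 0 0 (-1) (-1) (by omega) (by omega)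
      (fun _ => by omega) (fun _ => by omega)
    rw [if_pos (by omega : (0 : Int) < m ∨ (0 : Int) < m)] at hscan
    have hL : max (pvBScan m Y 0 0 0 (-1) (-1)).1 (pvBScan m Y 0 0 0 (-1) (-1)).2 + 1
        = ((pvCut Y m m : Nat) : Int) := by simpa using hscan
    simp only [hL, PySem.List.slice_to_natCast]

-- ===== VERDICT (by name: the statement is the Claim_ definition above) =====
theorem get_balanced_dataset_spec : Claim_equal_get_balanced_dataset := by
  intro X Y _ hpre
  unfold Spec_get_balanced_dataset
  rw [A_closed X Y hpre, B_closed X Y]
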